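-- pv_equiv track=rewrite | github.com/Lankongs/Python_1141_01357106 | week3/HW3-2.py | build_height
-- ===== SOURCE A (Python) =====
-- def build_height(preOrder, inOrder):
--     if not preOrder or not inOrder:
--         return 0
--     root = preOrder[0]
--     mid = inOrder.index(root)
--     left_h = build_height(preOrder[1:1+mid], inOrder[:mid])
--     right_h = build_height(preOrder[1+mid:], inOrder[mid+1:])
--     return 1 + max(left_h, right_h)
-- ===== SOURCE B (Python) =====
-- def build_height(preOrder, inOrder):
--     # O(n): one dict of first inOrder positions built once, then a recursion over
--     # index windows [lo, hi) with a single moving pointer into preOrder -- no slicing,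
--     # no repeated .index scans.
--     if not preOrder or not inOrder:
--         return 0
--     pos = {}
--     for i, v in enumerate(inOrder):
--         if v not in pos:
--             pos[v] = i
--     k = 0
--     def go(lo, hi):
--         nonlocal k
--         if lo >= hi or k >= len(preOrder):
--             return 0
--         m = pos[preOrder[k]]
--         if not (lo <= m < hi):
--             return 0
--         k += 1
--         left_h = go(lo, m)
--         right_h = go(m + 1, hi)
--         return 1 + max(left_h, right_h)
--     return go(0, len(inOrder))
-- ===== Notes on version B (the rewrite author's own statement) =====
-- stated objective: alternative
-- what changed: Replaced the recursive slice-and-index divide-and-conquer (which rescans inOrder with .index and copies four list slices at every node) by one dict of first inOrder positions built once plus a recursion over index windows [lo, hi) with a single moving preOrder pointer.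
-- outside the precondition, e.g. on build_height([1, 1], [1, 1]): A returns 2, B returns 1; on build_height([1, 2], [2, 1, 3]): A returns 2, B returns 2
import Mathlib
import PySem

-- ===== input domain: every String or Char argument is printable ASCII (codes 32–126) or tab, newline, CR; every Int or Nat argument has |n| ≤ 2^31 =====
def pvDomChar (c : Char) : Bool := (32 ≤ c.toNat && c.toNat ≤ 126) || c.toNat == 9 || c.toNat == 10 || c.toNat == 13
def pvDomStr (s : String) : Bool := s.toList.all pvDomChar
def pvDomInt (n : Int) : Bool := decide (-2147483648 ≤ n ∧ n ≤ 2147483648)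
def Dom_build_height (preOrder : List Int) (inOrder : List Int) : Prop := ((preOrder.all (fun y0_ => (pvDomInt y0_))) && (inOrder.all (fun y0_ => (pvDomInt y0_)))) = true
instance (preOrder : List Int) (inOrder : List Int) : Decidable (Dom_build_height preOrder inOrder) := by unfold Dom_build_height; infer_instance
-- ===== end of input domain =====

-- B replaces A's recursive slice-and-.index divide-and-conquer by a dict of first inOrder
-- positions built once plus a recursion over index windows with one moving preOrder pointer
-- (no slicing, no repeated .index scans at each node).


-- ===== PORT A =====
-- cast bridges for A's slice arguments (Int literals/mid : Nat), used by the port's termination proof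
lemma pv_slice_one (xs : List Int) (mid : Nat) :
    PySem.List.slice xs (some 1) (some (1 + (mid : Int))) = (xs.drop 1).take mid := by
  have h := PySem.List.slice_natCast (xs := xs) (a := 1) (b := 1 + mid)
  push_cast at h
  simpa using h

lemma pv_slice_from (xs : List Int) (mid : Nat) :
    PySem.List.slice xs (some (1 + (mid : Int))) none = xs.drop (1 + mid) := by
  have h := PySem.List.slice_from_natCast (xs := xs) (a := 1 + mid)
  push_cast at h
  simpa using h

-- literal port of A: empty check, root = preOrder[0], mid = inOrder.index(root)
-- (none = ValueError, excluded by Pre_), four slices, 1 + max of the recursions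
def build_height (preOrder : List Int) (inOrder : List Int) : Int :=
  if preOrder.isEmpty || inOrder.isEmpty then 0
  else
    let root := PySem.List.pyGetD preOrder 0 0
    match PySem.List.index? inOrder root with
    | none => 0   -- Python raises ValueError here; such inputs are outside Pre_
    | some mid =>
      let left_h := build_height (PySem.List.slice preOrder (some 1) (some (1 + (mid : Int))))
                                 (PySem.List.slice inOrder none (some (mid : Int)))
      let right_h := build_height (PySem.List.slice preOrder (some (1 + (mid : Int))) none)
                                  (PySem.List.slice inOrder (some ((mid : Int) + 1)) none)
      1 + max left_h right_h
termination_by preOrder.length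
decreasing_by
  · rw [pv_slice_one]
    have hne : ¬ (preOrder.isEmpty || inOrder.isEmpty) = true := by assumption
    simp only [Bool.or_eq_true, not_or, List.isEmpty_iff] at hne
    have hpos := List.length_pos_iff.mpr hne.1
    simp only [List.length_take, List.length_drop]
    omega
  · rw [pv_slice_from]
    have hne : ¬ (preOrder.isEmpty || inOrder.isEmpty) = true := by assumption
    simp only [Bool.or_eq_true, not_or, List.isEmpty_iff] at hne
    have hpos := List.length_pos_iff.mpr hne.1
    simp only [List.length_drop]
    omega

-- ===== PORT B =====
-- pos = {v: first index of v in inOrder}  (the loop "if v not in pos: pos[v] = i")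
def bhPos (inOrder : List Int) : PySem.Dict Int Int :=
  (PySem.List.enumerate inOrder).foldl
    (fun d p => if d.contains p.2 then d else d.insert p.2 p.1) PySem.Dict.empty

-- the inner recursion go(lo, hi) of B; the nonlocal pointer k is threaded through explicitly,
-- so each call returns (height, new k)
def bhGo (preOrder : List Int) (pos : PySem.Dict Int Int) : Nat → Nat → Nat → Int × Nat
  | lo, hi, k =>
    if lo ≥ hi ∨ k ≥ preOrder.length then (0, k)
    else
      match pos.get? (PySem.List.pyGetD preOrder (k : Int) 0) with
      | none => (0, k)   -- Python raises KeyError here; such inputs are outside Pre_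
      | some m =>
        if hm : (lo : Int) ≤ m ∧ m < (hi : Int) then
          let lft := bhGo preOrder pos lo m.toNat (k + 1)
          let rgt := bhGo preOrder pos (m.toNat + 1) hi lft.2
          (1 + max lft.1 rgt.1, rgt.2)
        else (0, k)
termination_by lo hi _ => hi - lo
decreasing_by
  · omega
  · omega

def build_height_alt (preOrder : List Int) (inOrder : List Int) : Int :=
  if preOrder.isEmpty || inOrder.isEmpty then 0
  else (bhGo preOrder (bhPos inOrder) 0 inOrder.length 0).1

-- ===== PRECONDITION & SPEC =====
-- Pre_ admits the inputs on which A's value is the function's value: an empty list (A returns 0),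
-- a one-node preOrder whose node occurs in inOrder (A returns 1), and the natural domain of the
-- task: preOrder/inOrder the traversal pair of one binary tree with distinct node values.
-- Excluded: inputs where .index raises ValueError (B's dict lookup raises KeyError on the same
-- kind of input), length-mismatched/inconsistent pairs that decompose as no tree (A's returned
-- value there is accidental), and duplicate-valued inOrder, where first-occurrence splitting
-- (A) versus a first-occurrence dict (B) are two equally accidental readings.
-- validPairLen n pre ino: pre/ino decompose as the preorder/inorder of one binary tree
-- (root = pre[0] splits ino; recurse on the two halves).  The first argument is the
-- recursion depth bound n = pre.length, structural so that `decide` can evaluate it;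
-- each recursive call is on a strict sublist of pre, so n never runs out (valid_exists
-- below consumes it by induction on n).
def validPairLen : Nat → List Int → List Int → Bool
  | _, [], ino => ino.isEmpty
  | 0, _ :: _, _ => false
  | n + 1, r :: p, ino =>
    match PySem.List.index? ino r with
    | none => false
    | some mid =>
      validPairLen n (p.take mid) (ino.take mid) && validPairLen n (p.drop mid) (ino.drop (mid + 1))

def validPair (pre ino : List Int) : Bool := validPairLen pre.length pre ino

def Pre_build_height (preOrder : List Int) (inOrder : List Int) : Prop :=
  preOrder = [] ∨ inOrder = [] ∨
  (preOrder.length = 1 ∧ preOrder.headD 0 ∈ inOrder) ∨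
  (inOrder.Nodup ∧ validPair preOrder inOrder = true)
instance (preOrder : List Int) (inOrder : List Int) : Decidable (Pre_build_height preOrder inOrder) := by
  unfold Pre_build_height; infer_instance

def pvWitness_build_height : List Int × List Int := ([2, 1, 3], [1, 2, 3])

def Spec_build_height (preOrder : List Int) (inOrder : List Int) (out : Int) : Prop := out = build_height_alt preOrder inOrder
instance (preOrder : List Int) (inOrder : List Int) (out : Int) : Decidable (Spec_build_height preOrder inOrder out) := by unfold Spec_build_height; infer_instance

-- ===== CLAIM (what is proved, stated in full; the proofs are below) =====
def Claim_equal_build_height : Prop := ∀ (preOrder : List Int) (inOrder : List Int), Dom_build_height preOrder inOrder → Pre_build_height preOrder inOrder → Spec_build_height preOrder inOrder (build_height preOrder inOrder)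

-- ===== LEMMAS AND PROOFS =====

-- slice-argument cast bridges used by the A-side proofs
lemma pv_slice_to (xs : List Int) (mid : Nat) :
    PySem.List.slice xs none (some (mid : Int)) = xs.take mid :=
  PySem.List.slice_to_natCast (xs := xs) (b := mid)

lemma pv_slice_from1 (xs : List Int) (mid : Nat) :
    PySem.List.slice xs (some ((mid : Int) + 1)) none = xs.drop (mid + 1) := by
  have h := PySem.List.slice_from_natCast (xs := xs) (a := mid + 1)
  push_cast at h
  simpa using h


-- binary trees: the common shape behind a valid (preorder, inorder) pair
inductive BTree
  | leaf : BTree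
  | node : BTree → Int → BTree → BTree

def preT : BTree → List Int
  | .leaf => []
  | .node l v r => v :: (preT l ++ preT r)

def inT : BTree → List Int
  | .leaf => []
  | .node l v r => inT l ++ v :: inT r

def heightT : BTree → Int
  | .leaf => 0
  | .node l _ r => 1 + max (heightT l) (heightT r)

-- the invariant valid_exists provides: each root does not occur in its left subtree's inorder
-- (its first occurrence in inT t is the splitting point), which is all A's .index and B's
-- pop-matching need; node values may repeat elsewhere.
def goodT : BTree → Prop
  | .leaf => True
  | .node l v r => v ∉ inT l ∧ goodT l ∧ goodT r

lemma len_preT_eq (t : BTree) : (preT t).length = (inT t).length := by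
  induction t with
  | leaf => rfl
  | node l v r ihl ihr => simp [preT, inT]; omega

-- every pair accepted by validPair is the traversal pair of some tree
lemma valid_exists : ∀ (n : Nat) (pre ino : List Int), pre.length ≤ n →
    validPairLen n pre ino = true → ∃ t, pre = preT t ∧ ino = inT t ∧ goodT t := by
  intro n
  induction n with
  | zero =>
    intro pre ino hlen hv
    have hpre : pre = [] := List.eq_nil_of_length_eq_zero (Nat.le_zero.mp hlen)
    subst hpre
    rw [show validPairLen 0 [] ino = ino.isEmpty from rfl, List.isEmpty_iff] at hv
    exact ⟨.leaf, rfl, by simp [inT, hv], trivial⟩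
  | succ n ih =>
    intro pre ino hlen hv
    cases pre with
    | nil =>
      rw [show validPairLen (n + 1) [] ino = ino.isEmpty from rfl, List.isEmpty_iff] at hv
      exact ⟨.leaf, rfl, by simp [inT, hv], trivial⟩
    | cons r p =>
      rw [validPairLen] at hv
      cases hidx : PySem.List.index? ino r with
      | none => rw [hidx] at hv; simp at hv
      | some mid =>
        rw [hidx] at hv
        simp only [Bool.and_eq_true] at hv
        obtain ⟨hv1, hv2⟩ := hv
        rw [PySem.List.index?_eq_some_iff] at hidx
        obtain ⟨a, b, hino, hlen_a, hnotin⟩ := hidx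
        have hta : ino.take mid = a := by
          rw [hino, ← hlen_a]; exact List.take_left' rfl
        have hdb : ino.drop (mid + 1) = b := by
          rw [hino, ← hlen_a]
          rw [show a ++ r :: b = (a ++ [r]) ++ b by simp]
          exact List.drop_left' (by simp)
        simp only [List.length_cons] at hlen
        obtain ⟨tl, hpl, hil, hgl⟩ := ih (p.take mid) (ino.take mid)
          (by simp only [List.length_take]; omega) hv1
        obtain ⟨tr, hpr, hir, hgr⟩ := ih (p.drop mid) (ino.drop (mid + 1))
          (by simp only [List.length_drop]; omega) hv2
        refine ⟨.node tl r tr, ?_, ?_, ?_⟩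
        · simp only [preT, ← hpl, ← hpr, List.take_append_drop]
        · rw [show inT (BTree.node tl r tr) = inT tl ++ r :: inT tr from rfl,
              ← hil, ← hir, hta, hdb, hino]
        · exact ⟨by rw [← hil, hta]; exact hnotin, hgl, hgr⟩

-- A computes the height of the tree (distinct inorder values)
lemma build_height_tree (t : BTree) (hg : goodT t) :
    build_height (preT t) (inT t) = heightT t := by
  induction t with
  | leaf => simp [build_height, preT, inT, heightT]
  | node l v r ihl ihr =>
    obtain ⟨hvl, hgl, hgr⟩ := hg
    have hidx : PySem.List.index? (inT l ++ v :: inT r) v = some (inT l).length := by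
      rw [PySem.List.index?_eq_some_iff]
      exact ⟨inT l, inT r, rfl, rfl, hvl⟩
    have hpre : preT (BTree.node l v r) = v :: (preT l ++ preT r) := rfl
    have hin : inT (BTree.node l v r) = inT l ++ v :: inT r := rfl
    rw [hpre, hin, build_height]
    have hemp : ((v :: (preT l ++ preT r)).isEmpty || (inT l ++ v :: inT r).isEmpty) = false := by
      simp
    rw [hemp]
    simp only [Bool.false_eq_true, if_false, PySem.List.pyGetD_zero_cons, hidx]
    rw [pv_slice_one, pv_slice_to, pv_slice_from, pv_slice_from1]
    have hsl1 : ((v :: (preT l ++ preT r)).drop 1).take (inT l).length = preT l := by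
      simp only [List.drop_succ_cons, List.drop_zero]
      exact List.take_left' (len_preT_eq l)
    have hsl2 : (inT l ++ v :: inT r).take (inT l).length = inT l := List.take_left' rfl
    have hsl3 : (v :: (preT l ++ preT r)).drop (1 + (inT l).length) = preT r := by
      rw [Nat.add_comm, List.drop_succ_cons]
      exact List.drop_left' (len_preT_eq l)
    have hsl4 : (inT l ++ v :: inT r).drop ((inT l).length + 1) = inT r := by
      rw [show inT l ++ v :: inT r = (inT l ++ [v]) ++ inT r by simp]
      exact List.drop_left' (by simp)
    rw [hsl1, hsl2, hsl3, hsl4, ihl hgl, ihr hgr]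
    rfl

-- B's dict of first positions: lookup = first index in inOrder (shifted by the start s)
lemma bhPos_go (v : Int) : ∀ (xs : List Int) (s : Int) (d : PySem.Dict Int Int),
    ((PySem.List.enumerate xs s).foldl
      (fun d p => if d.contains p.2 then d else d.insert p.2 p.1) d).get? v =
    (d.get? v).or ((PySem.List.index? xs v).map (fun k => s + (k : Int))) := by
  intro xs
  induction xs with
  | nil => intro s d; simp
  | cons x xs ih =>
    intro s d
    rw [PySem.List.enumerate_cons, List.foldl_cons, ih (s + 1)]
    by_cases hvx : x = v
    · subst hvx
      rw [PySem.List.index?_cons_self]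
      by_cases hc : d.contains x
      · have hs : (d.get? x).isSome := by rw [← PySem.Dict.contains_eq_isSome_get?, hc]
        simp only [hc, if_true, Option.or_of_isSome hs]
      · have hn : d.get? x = none := by
          have h1 := PySem.Dict.contains_eq_isSome_get? d x
          rw [Bool.not_eq_true] at hc
          rw [hc] at h1
          exact Option.not_isSome_iff_eq_none.mp (by rw [← h1]; simp)
        simp only [hc, if_false, Bool.false_eq_true, PySem.Dict.get?_insert_self, hn]
        simp
    · rw [PySem.List.index?_cons_of_ne xs hvx]
      have hstep : (if d.contains x then d else d.insert x s).get? v = d.get? v := by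
        by_cases hc : d.contains x
        · simp [hc]
        · simp only [hc, if_false, Bool.false_eq_true]
          exact PySem.Dict.get?_insert_of_ne d s (fun h => hvx h.symm)
      rw [hstep]
      cases hix : PySem.List.index? xs v with
      | none => simp
      | some k0 =>
        have harith : s + 1 + (k0 : Int) = s + ((k0 : Int) + 1) := by ring
        simp [harith]

lemma bhPos_get (ino : List Int) (v : Int) :
    (bhPos ino).get? v = (PySem.List.index? ino v).map (fun k => (k : Int)) := by
  unfold bhPos
  rw [bhPos_go v ino 0 PySem.Dict.empty]
  simp

-- a list element read through drop: used to pin preOrder[k] and the guards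
lemma getElem?_of_drop_cons {xs : List Int} {k : Nat} {a : Int} {w : List Int}
    (h : xs.drop k = a :: w) : xs[k]? = some a := by
  rw [← List.head?_drop, h]; rfl

-- B's window recursion computes the height of the tree
lemma go_tree (preO ino : List Int) (hnd : ino.Nodup) :
    ∀ (t : BTree) (k lo : Nat) (restP restI : List Int),
    preO.drop k = preT t ++ restP →
    ino.drop lo = inT t ++ restI →
    bhGo preO (bhPos ino) lo (lo + (inT t).length) k = (heightT t, k + (preT t).length) := by
  intro t
  induction t with
  | leaf =>
    intro k lo _ _ _ _
    rw [bhGo]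
    simp [preT, inT, heightT]
  | node l v r ihl ihr =>
    intro k lo restP restI hP hI
    have hPt : preT (BTree.node l v r) = v :: (preT l ++ preT r) := rfl
    have hIt : inT (BTree.node l v r) = inT l ++ v :: inT r := rfl
    rw [hPt] at hP
    rw [hIt] at hI
    -- preOrder[k] = v, and k is in range
    have hk : preO[k]? = some v := getElem?_of_drop_cons hP
    have hklt : k < preO.length := (List.getElem?_eq_some_iff.mp hk).1
    -- lo is in range
    have hlo : lo < ino.length := by
      have : ino.drop lo ≠ [] := by rw [hI]; simp
      rw [ne_eq, List.drop_eq_nil_iff] at this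
      omega
    -- the first occurrence of v in ino sits at position lo + (inT l).length
    have hino : ino = (ino.take lo ++ inT l) ++ v :: (inT r ++ restI) := by
      conv_lhs => rw [← List.take_append_drop lo ino]
      rw [hI]; simp
    have hvpre : v ∉ ino.take lo ++ inT l := by
      intro hmem
      have h2 := hino ▸ hnd
      rw [List.nodup_append] at h2
      exact h2.2.2 v hmem v (List.mem_cons_self) rfl
    have hidx : PySem.List.index? ino v = some (lo + (inT l).length) := by
      rw [PySem.List.index?_eq_some_iff]
      exact ⟨ino.take lo ++ inT l, inT r ++ restI, hino,
        by simp [List.length_take]; omega, hvpre⟩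
    -- unfold one step of bhGo
    rw [bhGo]
    have hguard : ¬ (lo ≥ lo + (inT (BTree.node l v r)).length ∨ k ≥ preO.length) := by
      rw [hIt]; simp only [List.length_append, List.length_cons]; omega
    rw [if_neg hguard]
    have hget : PySem.List.pyGetD preO (k : Int) 0 = v := by
      rw [PySem.List.pyGetD_natCast, List.getD, hk]; rfl
    have hpos : (bhPos ino).get? v = some ((lo + (inT l).length : Nat) : Int) := by
      rw [bhPos_get, hidx]; rfl
    rw [hget, hpos]
    have hwin : ((lo : Int) ≤ ((lo + (inT l).length : Nat) : Int) ∧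
        ((lo + (inT l).length : Nat) : Int) < ((lo + (inT (BTree.node l v r)).length : Nat) : Int)) := by
      rw [hIt]; simp only [List.length_append, List.length_cons]; push_cast; omega
    simp only [dif_pos hwin]
    -- left subtree
    have htoNat : ((lo + (inT l).length : Nat) : Int).toNat = lo + (inT l).length := by omega
    have hPl : preO.drop (k + 1) = preT l ++ (preT r ++ restP) := by
      rw [← List.drop_drop, hP]; simp
    have hIl : ino.drop lo = inT l ++ (v :: inT r ++ restI) := by rw [hI]; simp
    have hL := ihl (k + 1) lo (preT r ++ restP) (v :: inT r ++ restI) hPl hIl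
    -- right subtree
    have hPr : preO.drop (k + 1 + (preT l).length) = preT r ++ restP := by
      rw [← List.drop_drop, hPl]
      exact List.drop_left' (by simp)
    have hIr : ino.drop (lo + (inT l).length + 1) = inT r ++ restI := by
      rw [Nat.add_assoc, ← List.drop_drop, hI]
      rw [show inT l ++ v :: inT r ++ restI = (inT l ++ [v]) ++ (inT r ++ restI) by simp]
      exact List.drop_left' (by simp)
    have hR := ihr (k + 1 + (preT l).length) (lo + (inT l).length + 1) restP restI hPr hIr
    have hhi : lo + (inT (BTree.node l v r)).length = lo + (inT l).length + 1 + (inT r).length := by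
      rw [hIt]; simp only [List.length_append, List.length_cons]; omega
    rw [hhi, htoNat, hL]
    simp only
    rw [hR]
    refine Prod.ext ?_ ?_
    · simp only [heightT]
    · simp only [preT, List.length_cons, List.length_append]
      omega

-- B computes the height of the tree (distinct inorder values)
lemma build_height_alt_tree (t : BTree) (hnd : (inT t).Nodup) :
    build_height_alt (preT t) (inT t) = heightT t := by
  cases t with
  | leaf => simp [build_height_alt, preT, inT, heightT]
  | node l v r =>
    unfold build_height_alt
    have hemp : ((preT (BTree.node l v r)).isEmpty || (inT (BTree.node l v r)).isEmpty) = false := by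
      simp [preT, inT]
    rw [hemp]
    simp only [Bool.false_eq_true, if_false]
    have h := go_tree (preT (BTree.node l v r)) (inT (BTree.node l v r)) hnd
      (BTree.node l v r) 0 0 [] [] (by simp) (by simp)
    rw [show (inT (BTree.node l v r)).length = 0 + (inT (BTree.node l v r)).length by omega, h]

-- the three easy regions of Pre_: an empty list, and a one-node preOrder that hits inOrder
lemma build_height_nil (ino : List Int) : build_height [] ino = 0 := by
  rw [build_height]; simp

lemma build_height_nil' (pre : List Int) : build_height pre [] = 0 := by
  rw [build_height]; simp

lemma build_height_single (x : Int) (ino : List Int) (hx : x ∈ ino) :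
    build_height [x] ino = 1 := by
  rw [build_height]
  have hemp : (([x] : List Int).isEmpty || ino.isEmpty) = false := by
    simp [List.ne_nil_of_mem hx]
  rw [hemp]
  simp only [Bool.false_eq_true, if_false, PySem.List.pyGetD_zero_cons]
  have hsome : (PySem.List.index? ino x).isSome := Iff.mpr (PySem.List.index?_isSome_iff ino x) hx
  obtain ⟨mid, hmid⟩ := Option.isSome_iff_exists.mp hsome
  simp only [hmid]
  rw [pv_slice_one, pv_slice_to, pv_slice_from, pv_slice_from1]
  have e1 : (([x] : List Int).drop 1).take mid = [] := by simp
  have e2 : ([x] : List Int).drop (1 + mid) = [] := by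
    cases mid <;> simp
  rw [e1, e2, build_height_nil, build_height_nil]
  rfl

lemma build_height_alt_single (x : Int) (ino : List Int) (hx : x ∈ ino) :
    build_height_alt [x] ino = 1 := by
  unfold build_height_alt
  have hemp : (([x] : List Int).isEmpty || ino.isEmpty) = false := by
    simp [List.ne_nil_of_mem hx]
  rw [hemp]
  simp only [Bool.false_eq_true, if_false]
  have hsome : (PySem.List.index? ino x).isSome := Iff.mpr (PySem.List.index?_isSome_iff ino x) hx
  obtain ⟨mid, hmid⟩ := Option.isSome_iff_exists.mp hsome
  obtain ⟨a, b, hino, hlen, -⟩ := (PySem.List.index?_eq_some_iff ino x mid).mp hmid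
  have hmlt : mid < ino.length := by rw [hino, ← hlen]; simp
  rw [bhGo]
  have hguard : ¬ ((0 : Nat) ≥ ino.length ∨ (0 : Nat) ≥ ([x] : List Int).length) := by
    simp only [List.length_cons, List.length_nil, ge_iff_le, not_or, Nat.not_le]
    omega
  rw [if_neg hguard]
  have hget : PySem.List.pyGetD ([x] : List Int) ((0 : Nat) : Int) 0 = x := by
    simp
  have hpos : (bhPos ino).get? x = some ((mid : Nat) : Int) := by
    rw [bhPos_get, hmid]; rfl
  rw [hget, hpos]
  have hwin : (((0 : Nat) : Int) ≤ ((mid : Nat) : Int) ∧ ((mid : Nat) : Int) < ((ino.length : Nat) : Int)) := by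
    push_cast; omega
  simp only [dif_pos hwin]
  rw [bhGo, bhGo]
  simp

-- ===== VERDICT (by name: the statement is the Claim_ definition above) =====
theorem build_height_spec : Claim_equal_build_height := by
  intro preOrder inOrder _ hpre
  unfold Spec_build_height
  rcases hpre with h | h | ⟨h1, h2⟩ | ⟨hnd, hv⟩
  · subst h
    rw [build_height_nil]
    unfold build_height_alt
    simp
  · subst h
    rw [build_height_nil']
    unfold build_height_alt
    simp
  · obtain ⟨x, hx⟩ : ∃ x, preOrder = [x] := by
      cases preOrder with
      | nil => simp at h1
      | cons y tl =>
        cases tl with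
        | nil => exact ⟨y, rfl⟩
        | cons z tl' => simp at h1
    subst hx
    simp only [List.headD_cons] at h2
    rw [build_height_single x inOrder h2, build_height_alt_single x inOrder h2]
  · unfold validPair at hv
    obtain ⟨t, hp, hi, hg⟩ := valid_exists preOrder.length preOrder inOrder le_rfl hv
    subst hp; subst hi
    rw [build_height_tree t hg, build_height_alt_tree t hnd]
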